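-- pv_equiv track=rewrite | github.com/chvyshnavi12/data-structure-and-algorithms | binary_search/painter_partition.py | painters_partition
-- ===== SOURCE A (Python) =====
-- def can_paint(C, A, max_units):
--     painters = 1
--     total = 0
--
--     for length in C:
--         if length > max_units:
--             return False
--
--         if total + length > max_units:
--             painters += 1
--             total = length
--             if painters > A:
--                 return False
--         else:
--             total += length
--
--     return True
--
-- def painters_partition(A, B, C):
--     MOD = 10000003
--
--     left, right = max(C), sum(C)
--     ans = right
--
--     while left <= right:
--         mid = (left + right) // 2
--
--         if can_paint(C, A, mid):
--             ans = mid
--             right = mid - 1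
--         else:
--             left = mid + 1
--
--     return (ans * B) % MOD
-- ===== SOURCE B (Python) =====
-- def painters_partition(A, B, C):
--     MOD = 10000003
--     K = A if A > 1 else 1  # at least one painter always paints
--
--     def painters_needed(m):
--         # painters used by the greedy left-to-right packing with cap m
--         p, total = 1, 0
--         for x in C:
--             if total + x > m:
--                 p, total = p + 1, x
--             else:
--                 total += x
--         return p
--
--     def feasible(m):
--         return all(x <= m for x in C) and painters_needed(m) <= K
--
--     def bisect(lo, hi):
--         # least feasible midpoint reached by bisection; None if none is
--         if lo > hi:
--             return None
--         mid = (lo + hi) // 2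
--         if feasible(mid):
--             deeper = bisect(lo, mid - 1)
--             return mid if deeper is None else deeper
--         return bisect(mid + 1, hi)
--
--     total_work = sum(C)
--     ans = bisect(max(C), total_work)
--     if ans is None:
--         ans = total_work
--     return ans * B % MOD
-- ===== Notes on version B (the rewrite author's own statement) =====
-- stated objective: alternative
-- what changed: The while-loop binary search threading a running-answer accumulator is restructured as an Option-returning recursive bisection, and the short-circuit greedy feasibility scan is decomposed into an over-cap check plus a full greedy painter count compared once against max(A,1).
import Mathlib
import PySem

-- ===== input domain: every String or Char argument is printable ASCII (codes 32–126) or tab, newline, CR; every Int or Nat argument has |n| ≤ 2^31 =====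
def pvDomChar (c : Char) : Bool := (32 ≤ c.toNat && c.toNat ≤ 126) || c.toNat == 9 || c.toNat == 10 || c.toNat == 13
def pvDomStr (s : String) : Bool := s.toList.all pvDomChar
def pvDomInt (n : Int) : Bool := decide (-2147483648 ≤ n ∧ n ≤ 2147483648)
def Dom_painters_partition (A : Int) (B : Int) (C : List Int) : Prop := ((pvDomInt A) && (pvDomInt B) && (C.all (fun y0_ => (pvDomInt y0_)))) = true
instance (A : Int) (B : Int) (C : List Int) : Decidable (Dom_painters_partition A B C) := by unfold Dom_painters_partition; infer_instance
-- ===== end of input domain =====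

-- B restructures A's binary search as an Option-returning recursion without the running-answer
-- accumulator and splits the feasibility test into an over-cap check plus a full greedy painter
-- count compared once against max(A, 1) (objective: alternative; same asymptotic cost).

-- ===== PORT A =====
def canPaintGo (A max_units : Int) : List Int → Int → Int → Bool
  | [], _painters, _total => true
  | length :: rest, painters, total =>
    if length > max_units then false
    else if total + length > max_units then
      if painters + 1 > A then false
      else canPaintGo A max_units rest (painters + 1) length
    else canPaintGo A max_units rest painters (total + length)

def can_paint (C : List Int) (A : Int) (max_units : Int) : Bool := canPaintGo A max_units C 1 0

-- fuel = interval length + 1: a totality guard only (the interval shrinks strictly each pass)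
def bsearchA (C : List Int) (A : Int) : Nat → Int → Int → Int → Int
  | 0, _left, _right, ans => ans
  | fuel + 1, left, right, ans =>
    if left ≤ right then
      let mid := PySem.Int.floordiv (left + right) 2
      if can_paint C A mid then bsearchA C A fuel left (mid - 1) mid
      else bsearchA C A fuel (mid + 1) right ans
    else ans

def painters_partition (A : Int) (B : Int) (C : List Int) : Int :=
  match PySem.List.max? C (fun y => y) with
  | none => 0   -- Python's max(C) raises ValueError on []; excluded by Pre_
  | some mx => PySem.Int.mod (bsearchA C A ((C.sum + 1 - mx).toNat + 1) mx C.sum C.sum * B) 10000003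

-- ===== PORT B =====
def paintersNeeded (m : Int) : List Int → Int → Int → Int
  | [], p, _t => p
  | x :: rest, p, t =>
    if t + x > m then paintersNeeded m rest (p + 1) x else paintersNeeded m rest p (t + x)

def feasibleB (C : List Int) (k m : Int) : Bool :=
  C.all (fun x => decide (x ≤ m)) && decide (paintersNeeded m C 1 0 ≤ k)

-- fuel = interval length + 1: a totality guard only (the interval shrinks strictly each pass)
def bisectB (C : List Int) (k : Int) : Nat → Int → Int → Option Int
  | 0, _lo, _hi => none
  | fuel + 1, lo, hi =>
    if lo ≤ hi then
      let mid := PySem.Int.floordiv (lo + hi) 2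
      if feasibleB C k mid then
        match bisectB C k fuel lo (mid - 1) with
        | none => some mid
        | some v => some v
      else bisectB C k fuel (mid + 1) hi
    else none

def painters_partition_alt (A : Int) (B : Int) (C : List Int) : Int :=
  let k := if A > 1 then A else 1
  match PySem.List.max? C (fun y => y) with
  | none => 0   -- Python's max(C) raises ValueError on []; excluded by Pre_
  | some mx =>
    let total_work := C.sum
    let ans := (bisectB C k ((total_work + 1 - mx).toNat + 1) mx total_work).getD total_work
    PySem.Int.mod (ans * B) 10000003

-- ===== PRECONDITION & SPEC =====
-- Pre_ excludes only the empty board list, on which A's max(C) raises ValueError.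
def Pre_painters_partition (A : Int) (B : Int) (C : List Int) : Prop := C ≠ []
instance (A : Int) (B : Int) (C : List Int) : Decidable (Pre_painters_partition A B C) := by unfold Pre_painters_partition; infer_instance
def pvWitness_painters_partition : Int × Int × List Int := (2, 3, [1, 2])

def Spec_painters_partition (A : Int) (B : Int) (C : List Int) (out : Int) : Prop := out = painters_partition_alt A B C
instance (A : Int) (B : Int) (C : List Int) (out : Int) : Decidable (Spec_painters_partition A B C out) := by unfold Spec_painters_partition; infer_instance

-- ===== CLAIM (what is proved, stated in full; the proofs are below) =====
def Claim_equal_painters_partition : Prop := ∀ (A : Int) (B : Int) (C : List Int), Dom_painters_partition A B C → Pre_painters_partition A B C → Spec_painters_partition A B C (painters_partition A B C)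

-- ===== LEMMAS AND PROOFS =====

-- the greedy painter count is at least its starting value
theorem paintersNeeded_ge (m : Int) : ∀ (l : List Int) (p t : Int), p ≤ paintersNeeded m l p t := by
  intro l
  induction l with
  | nil => intro p t; simp [paintersNeeded]
  | cons x rest ih =>
    intro p t
    simp only [paintersNeeded]
    split
    · have := ih (p + 1) x; omega
    · exact ih p (t + x)

-- A's short-circuit greedy scan equals "every board fits AND full painter count ≤ max(A,1)"
theorem canPaintGo_eq (A m : Int) :
    ∀ (l : List Int) (p t : Int), 1 ≤ p → p ≤ (if A > 1 then A else 1) →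
      canPaintGo A m l p t
        = (l.all (fun x => decide (x ≤ m)) && decide (paintersNeeded m l p t ≤ (if A > 1 then A else 1))) := by
  intro l
  induction l with
  | nil =>
    intro p t _ hpk
    simp [canPaintGo, paintersNeeded, hpk]
  | cons x rest ih =>
    intro p t hp hpk
    by_cases hx : x > m
    · simp [canPaintGo, paintersNeeded, hx]
    · by_cases hs : t + x > m
      · by_cases hp1 : p + 1 > A
        · have hge := paintersNeeded_ge m rest (p + 1) x
          have hk : ¬ paintersNeeded m rest (p + 1) x ≤ (if A > 1 then A else 1) := by
            split at hpk <;> split <;> omega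
          simp [canPaintGo, paintersNeeded, hx, hs, hp1, hk]
        · have hk1 : p + 1 ≤ (if A > 1 then A else 1) := by
            split <;> omega
          have hx' : (decide (x ≤ m)) = true := by simpa using (by omega : x ≤ m)
          simp only [canPaintGo, paintersNeeded, if_neg hx, if_pos hs, if_neg hp1,
            List.all_cons, hx', Bool.true_and]
          exact ih (p + 1) x (by omega) hk1
      · have hx' : (decide (x ≤ m)) = true := by simpa using (by omega : x ≤ m)
        simp only [canPaintGo, paintersNeeded, if_neg hx, if_neg hs,
          List.all_cons, hx', Bool.true_and]
        exact ih p (t + x) hp hpk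

theorem can_paint_eq_feasibleB (C : List Int) (A m : Int) :
    can_paint C A m = feasibleB C (if A > 1 then A else 1) m := by
  have h1 : (1 : Int) ≤ (if A > 1 then A else 1) := by split <;> omega
  simpa [can_paint, feasibleB] using canPaintGo_eq A m C 1 0 (by omega) h1

-- the accumulator-threading loop equals the Option-returning bisection (same fuel on both sides)
theorem bsearchA_eq_bisectB (C : List Int) (A k : Int)
    (hf : ∀ m, can_paint C A m = feasibleB C k m) :
    ∀ (fuel : Nat) (lo hi ans : Int),
      bsearchA C A fuel lo hi ans = (bisectB C k fuel lo hi).getD ans := by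
  intro fuel
  induction fuel with
  | zero => intro lo hi ans; rfl
  | succ n ih =>
    intro lo hi ans
    simp only [bsearchA, bisectB]
    by_cases h : lo ≤ hi
    · simp only [if_pos h, hf]
      by_cases hfe : feasibleB C k (PySem.Int.floordiv (lo + hi) 2)
      · simp only [if_pos hfe, ih lo (PySem.Int.floordiv (lo + hi) 2 - 1) (PySem.Int.floordiv (lo + hi) 2)]
        cases bisectB C k n lo (PySem.Int.floordiv (lo + hi) 2 - 1) <;> simp
      · simp only [if_neg hfe]
        exact ih (PySem.Int.floordiv (lo + hi) 2 + 1) hi ans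
    · simp [if_neg h]

-- ===== VERDICT (by name: the statement is the Claim_ definition above) =====
theorem painters_partition_spec : Claim_equal_painters_partition := by
  intro A B C _ _
  unfold Spec_painters_partition painters_partition painters_partition_alt
  cases hmx : PySem.List.max? C (fun y => y) with
  | none => rfl
  | some mx =>
    simp only []
    rw [bsearchA_eq_bisectB C A (if A > 1 then A else 1)
      (fun m => can_paint_eq_feasibleB C A m) ((C.sum + 1 - mx).toNat + 1) mx C.sum C.sum]
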